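-- pv_equiv track=rewrite | github.com/Abidoyesimze/FileScopeAI | backend/core_ai/views.py | _get_visualization_types
-- ===== SOURCE A (Python) =====
-- def _get_visualization_types(visualizations):
--     """Map visualization names to chart types"""
--     type_mapping = {
--         'distribution_': 'histogram',
--         'correlation_': 'heatmap',
--         'scatter_': 'scatter',
--         'boxplot_': 'boxplot',
--         'bar_': 'bar'
--     }
--     return {
--         name: next(
--             (v for k, v in type_mapping.items() if name.startswith(k)),
--             'chart'
--         )
--         for name in visualizations.keys()
--     }
-- ===== SOURCE B (Python) =====
-- def _get_visualization_types(visualizations):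
--     """Map visualization names to chart types"""
--     type_mapping = {
--         'distribution_': 'histogram',
--         'correlation_': 'heatmap',
--         'scatter_': 'scatter',
--         'boxplot_': 'boxplot',
--         'bar_': 'bar'
--     }
--     # Staged sweeps instead of a per-name scan: start every name at 'chart',
--     # then one sweep per prefix overwrites the names carrying that prefix.
--     # Correct because no prefix is a prefix of another, so at most one sweep
--     # ever touches a given name.
--     result = dict.fromkeys(visualizations, 'chart')
--     for prefix, chart_type in type_mapping.items():
--         for name in result:
--             if name.startswith(prefix):
--                 result[name] = chart_type
--     return result
-- ===== Notes on version B (the rewrite author's own statement) =====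
-- stated objective: alternative
-- what changed: Instead of scanning the five prefixes per name with a next() generator, B initialises every name to 'chart' with dict.fromkeys and runs one overwrite sweep per prefix over the result dict; mutual exclusivity of the prefixes makes the staged sweeps equal to A's first-match scan.
import Mathlib
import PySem

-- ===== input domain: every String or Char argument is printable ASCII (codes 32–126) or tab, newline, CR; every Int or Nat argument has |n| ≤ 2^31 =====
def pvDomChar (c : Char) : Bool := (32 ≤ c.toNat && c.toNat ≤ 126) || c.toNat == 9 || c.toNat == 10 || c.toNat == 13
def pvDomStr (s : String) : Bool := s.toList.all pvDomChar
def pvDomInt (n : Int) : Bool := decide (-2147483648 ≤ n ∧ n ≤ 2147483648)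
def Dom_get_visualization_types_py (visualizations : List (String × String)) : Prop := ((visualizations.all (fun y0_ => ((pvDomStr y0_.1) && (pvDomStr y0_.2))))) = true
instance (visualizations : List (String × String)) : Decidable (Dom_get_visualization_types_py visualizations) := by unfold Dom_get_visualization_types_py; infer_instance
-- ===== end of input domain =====

-- B replaces A's per-name scan over the five prefixes by staged sweeps: every name starts
-- at 'chart', then one pass per prefix overwrites the names carrying that prefix
-- (alternative decomposition; correct because no prefix is a prefix of another).

-- ===== PORT A =====
def pvAMapping : List (String × String) :=
  [("distribution_", "histogram"), ("correlation_", "heatmap"), ("scatter_", "scatter"),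
   ("boxplot_", "boxplot"), ("bar_", "bar")]

-- next((v for k, v in type_mapping.items() if name.startswith(k)), 'chart')
def pvANext (name : String) : String :=
  ((pvAMapping.find? (fun kv => PySem.Str.startswith name kv.1)).map Prod.snd).getD "chart"

def get_visualization_types_py (visualizations : List (String × String)) : List (String × String) :=
  (((PySem.Dict.ofList visualizations).keys).foldl
      (fun d name => d.insert name (pvANext name))
      (PySem.Dict.empty : PySem.Dict String String)).items

-- ===== PORT B =====
def pvBTable : List (String × String) :=
  [("distribution_", "histogram"), ("correlation_", "heatmap"), ("scatter_", "scatter"),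
   ("boxplot_", "boxplot"), ("bar_", "bar")]

def get_visualization_types_py_alt (visualizations : List (String × String)) : List (String × String) :=
  -- result = dict.fromkeys(visualizations, 'chart')
  let init : PySem.Dict String String :=
    PySem.Dict.mk (((PySem.Dict.ofList visualizations).keys).map (fun n => (n, "chart")))
  -- for prefix, chart_type in type_mapping.items(): for name in result: if …: result[name] = chart_type
  -- ('for name in result' iterates the live dict; the sweeps never add or remove a key,
  --  so folding over the keys snapshot taken at the start of each sweep is exact)
  (pvBTable.foldl
      (fun d pc =>
        d.keys.foldl
          (fun d2 name => if PySem.Str.startswith name pc.1 then d2.insert name pc.2 else d2)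
          d)
      init).items

-- ===== PRECONDITION & SPEC =====
def Spec_get_visualization_types_py (visualizations : List (String × String)) (out : List (String × String)) : Prop := out = get_visualization_types_py_alt visualizations
instance (visualizations : List (String × String)) (out : List (String × String)) : Decidable (Spec_get_visualization_types_py visualizations out) := by unfold Spec_get_visualization_types_py; infer_instance

-- ===== CLAIM (what is proved, stated in full; the proofs are below) =====
def Claim_equal_get_visualization_types_py : Prop := ∀ (visualizations : List (String × String)), Dom_get_visualization_types_py visualizations → Spec_get_visualization_types_py visualizations (get_visualization_types_py visualizations)

-- ===== LEMMAS AND PROOFS =====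

-- A's builder: inserting pairwise-fresh keys appends them in order.
lemma items_foldl_insert_fresh (f : String → String) :
    ∀ (ns : List String) (d : PySem.Dict String String),
      (∀ n ∈ ns, d.contains n = false) → ns.Nodup →
      (ns.foldl (fun d n => d.insert n (f n)) d).items = d.items ++ ns.map (fun n => (n, f n)) := by
  intro ns
  induction ns with
  | nil => intro d _ _; simp
  | cons n rest ih =>
    intro d hfresh hnd
    have hdn : d.contains n = false := hfresh n (by simp)
    have hrest : ∀ m ∈ rest, (d.insert n (f n)).contains m = false := by
      intro m hm
      rw [PySem.Dict.contains_insert]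
      have : m ≠ n := fun h => (List.nodup_cons.1 hnd).1 (h ▸ hm)
      simp [this, hfresh m (by simp [hm])]
    rw [List.foldl_cons, ih _ hrest (List.nodup_cons.1 hnd).2,
        PySem.Dict.items_insert_of_not_contains _ _ hdn]
    simp

-- One of B's sweeps: inserting existing keys rewrites values in place.
lemma items_sweep (p : String → Bool) (c : String) :
    ∀ (ks : List String) (d : PySem.Dict String String),
      (∀ k ∈ ks, d.contains k = true) →
      (ks.foldl (fun d2 n => if p n = true then d2.insert n c else d2) d).items
        = d.items.map (fun kv => if kv.1 ∈ ks ∧ p kv.1 = true then (kv.1, c) else kv) := by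
  intro ks
  induction ks with
  | nil => intro d _; simp
  | cons k rest ih =>
    intro d hc
    have hdk : d.contains k = true := hc k (by simp)
    by_cases hp : p k = true
    · have hc' : ∀ m ∈ rest, (d.insert k c).contains m = true := by
        intro m hm; rw [PySem.Dict.contains_insert]; simp [hc m (by simp [hm])]
      rw [List.foldl_cons, if_pos hp, ih _ hc',
          PySem.Dict.items_insert_of_contains _ _ hdk, List.map_map]
      apply List.map_congr_left
      rintro ⟨a, b⟩ -
      by_cases ha : a = k
      · subst ha; simp [hp]
      · simp [ha, Function.comp]
    · rw [List.foldl_cons, if_neg hp, ih _ (fun m hm => hc m (by simp [hm]))]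
      apply List.map_congr_left
      rintro ⟨a, b⟩ -
      by_cases ha : a = k
      · subst ha; simp [hp]
      · simp [ha]

-- All of B's sweeps at once: each entry's value is the last matching prefix's type.
lemma items_sweeps :
    ∀ (tbl : List (String × String)) (d : PySem.Dict String String),
      (tbl.foldl
        (fun d pc => d.keys.foldl
            (fun d2 name => if PySem.Str.startswith name pc.1 then d2.insert name pc.2 else d2) d)
        d).items
      = d.items.map (fun kv =>
          (kv.1, tbl.foldl (fun acc pc => if PySem.Str.startswith kv.1 pc.1 then pc.2 else acc) kv.2)) := by
  intro tbl
  induction tbl with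
  | nil => intro d; simp
  | cons pc rest ih =>
    intro d
    rw [List.foldl_cons, ih,
        items_sweep (fun n => PySem.Str.startswith n pc.1) pc.2 d.keys d
          (fun k hk => (PySem.Dict.contains_iff_mem_keys _ _).2 hk),
        List.map_map]
    apply List.map_congr_left
    rintro ⟨a, b⟩ hkv
    have hmem : a ∈ d.keys := PySem.Dict.mem_keys_of_mem_items d hkv
    by_cases hs : PySem.Chars.startswith a.toList pc.1.toList = true
    · simp [Function.comp, hmem, hs]
      rfl
    · simp [Function.comp, hmem, hs]
      rfl

-- two prefixes matched by the same name are prefix-comparable (used to show the five are exclusive)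
lemma sw_comparable {cs p q : List Char}
    (hp : PySem.Chars.startswith cs p = true) (hq : PySem.Chars.startswith cs q = true) :
    p <+: q ∨ q <+: p :=
  List.prefix_or_prefix_of_prefix
    ((PySem.Chars.startswith_iff _ _).1 hp) ((PySem.Chars.startswith_iff _ _).1 hq)

-- prefix q of the table cannot also match when p does (p, q incomparable)
lemma sw_false_of_sw {cs p q : List Char} (hp : PySem.Chars.startswith cs p = true)
    (h1 : ¬ p <+: q) (h2 : ¬ q <+: p) : PySem.Chars.startswith cs q = false := by
  cases hq : PySem.Chars.startswith cs q with
  | false => rfl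
  | true => rcases sw_comparable hp hq with hc | hc
            · exact absurd hc h1
            · exact absurd hc h2

-- per-name agreement: B's last-match staged fold equals A's first-match scan
lemma pointwise (n : String) :
    pvANext n
      = pvBTable.foldl (fun acc pc => if PySem.Str.startswith n pc.1 then pc.2 else acc) "chart" := by
  by_cases h1 : PySem.Chars.startswith n.toList ['d','i','s','t','r','i','b','u','t','i','o','n','_'] = true
  · have e2 := sw_false_of_sw (q := ['c','o','r','r','e','l','a','t','i','o','n','_']) h1 (by decide) (by decide)
    have e3 := sw_false_of_sw (q := ['s','c','a','t','t','e','r','_']) h1 (by decide) (by decide)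
    have e4 := sw_false_of_sw (q := ['b','o','x','p','l','o','t','_']) h1 (by decide) (by decide)
    have e5 := sw_false_of_sw (q := ['b','a','r','_']) h1 (by decide) (by decide)
    simp [pvBTable, pvANext, pvAMapping, h1, e2, e3, e4, e5]
  · by_cases h2 : PySem.Chars.startswith n.toList ['c','o','r','r','e','l','a','t','i','o','n','_'] = true
    · have e3 := sw_false_of_sw (q := ['s','c','a','t','t','e','r','_']) h2 (by decide) (by decide)
      have e4 := sw_false_of_sw (q := ['b','o','x','p','l','o','t','_']) h2 (by decide) (by decide)
      have e5 := sw_false_of_sw (q := ['b','a','r','_']) h2 (by decide) (by decide)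
      simp [pvBTable, pvANext, pvAMapping, List.find?, h1, h2, e3, e4, e5]
    · by_cases h3 : PySem.Chars.startswith n.toList ['s','c','a','t','t','e','r','_'] = true
      · have e4 := sw_false_of_sw (q := ['b','o','x','p','l','o','t','_']) h3 (by decide) (by decide)
        have e5 := sw_false_of_sw (q := ['b','a','r','_']) h3 (by decide) (by decide)
        simp [pvBTable, pvANext, pvAMapping, List.find?, h1, h2, h3, e4, e5]
      · by_cases h4 : PySem.Chars.startswith n.toList ['b','o','x','p','l','o','t','_'] = true
        · have e5 := sw_false_of_sw (q := ['b','a','r','_']) h4 (by decide) (by decide)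
          simp [pvBTable, pvANext, pvAMapping, List.find?, h1, h2, h3, h4, e5]
        · by_cases h5 : PySem.Chars.startswith n.toList ['b','a','r','_'] = true
          · simp [pvBTable, pvANext, pvAMapping, List.find?, h1, h2, h3, h4, h5]
          · simp [pvBTable, pvANext, pvAMapping, List.find?, h1, h2, h3, h4, h5]

-- ===== VERDICT (by name: the statement is the Claim_ definition above) =====
theorem get_visualization_types_py_spec : Claim_equal_get_visualization_types_py := by
  intro vis _
  unfold Spec_get_visualization_types_py get_visualization_types_py get_visualization_types_py_alt
  set ns := (PySem.Dict.ofList vis).keys with hns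
  have hA : (ns.foldl (fun d name => d.insert name (pvANext name))
      (PySem.Dict.empty : PySem.Dict String String)).items = ns.map (fun n => (n, pvANext n)) := by
    rw [items_foldl_insert_fresh pvANext ns PySem.Dict.empty
        (fun n _ => PySem.Dict.contains_empty n) (hns ▸ PySem.Dict.nodup_keys_ofList vis)]
    rfl
  rw [hA, items_sweeps]
  have hinit : (PySem.Dict.mk (ns.map (fun n => (n, "chart")))).items
      = ns.map (fun n => (n, "chart")) := rfl
  rw [hinit, List.map_map]
  apply List.map_congr_left
  intro n _
  simp only [Function.comp_apply]
  exact congrArg (fun v => (n, v)) (pointwise n)
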